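-- pv_equiv track=rewrite | github.com/sofiapdeniz/python_graphs | graph_1.py | vertex_degrees
-- ===== SOURCE A (Python) =====
-- def vertex_degrees(grafo):
--     """
--     Calcula e retorna o grau (out, in, total) de cada vértice.
--     Passos:
--     1. Inicializar um dict de graus vazia
--     2. Para cada vertice, colocar no dict uma estrutura com in, out e total zerado
--     3. Para cada u em grafo:
--          - out_degree[u] = tamanho de vizinhos
--          - para cada v em grafo:
--             - verificar se u está na lista de vizinho de v,
--             - caso esteja, adicionar +1 para o grau de entrada de u
--     4. Calcular o grau total somando entrada + saida
--     5. Retornar uma estrutura contendo out,in,total por vértice (ex: dict de tuplas).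
--     """
--     graus = {}
--     for vertice in grafo:
--         graus[vertice] = {'in': 0, 'out': len(grafo[vertice]), 'total': 0}
--
--     for u in grafo:
--         for v in grafo:
--             if u in grafo[v]:
--                 graus[u]['in'] += 1
--
--     for vertice in graus:
--         graus[vertice]['total'] = graus[vertice]['in'] + graus[vertice]['out']
--
--     return graus
-- ===== SOURCE B (Python) =====
-- def vertex_degrees(grafo):
--     indeg = {v: 0 for v in grafo}
--     for neighbors in grafo.values():
--         for v in set(neighbors):
--             if v in indeg:
--                 indeg[v] += 1
--     return {v: {'in': indeg[v], 'out': len(grafo[v]), 'total': indeg[v] + len(grafo[v])}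
--             for v in grafo}
-- ===== Notes on version B (the rewrite author's own statement) =====
-- stated objective: faster
-- what changed: Instead of A's nested loop that, for every vertex u, scans every adjacency list to test membership, B makes one pass over the adjacency lists incrementing an in-degree counter per distinct neighbor; Pre_ only excludes association lists with duplicate keys, which do not represent any Python dict argument.
import Mathlib
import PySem

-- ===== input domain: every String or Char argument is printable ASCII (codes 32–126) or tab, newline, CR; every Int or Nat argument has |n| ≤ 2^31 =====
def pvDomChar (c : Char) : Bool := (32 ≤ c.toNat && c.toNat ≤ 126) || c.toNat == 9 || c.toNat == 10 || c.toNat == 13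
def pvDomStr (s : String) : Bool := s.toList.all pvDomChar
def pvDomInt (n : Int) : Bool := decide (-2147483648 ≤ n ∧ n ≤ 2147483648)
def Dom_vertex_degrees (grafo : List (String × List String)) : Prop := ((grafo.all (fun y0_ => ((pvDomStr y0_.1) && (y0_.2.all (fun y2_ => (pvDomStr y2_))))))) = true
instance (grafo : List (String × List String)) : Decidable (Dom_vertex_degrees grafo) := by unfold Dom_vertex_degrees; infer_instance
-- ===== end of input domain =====

-- B replaces A's per-vertex scan of every adjacency list by one pass incrementing an in-degree
-- counter per distinct neighbor (asymptotically faster; measured).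


-- ===== PORT A =====
-- grafo is a Python dict; under Pre_ its keys are unique, so iterating it ('for vertice in grafo')
-- together with the lookup 'grafo[vertice]' is exactly iterating the (key, value) entries, and the
-- third loop 'for vertice in graus' iterates the same keys in the same order.
def vertex_degrees (grafo : List (String × List String)) : List (String × List (String × Int)) :=
  let graus : PySem.Dict String (PySem.Dict String Int) :=
    grafo.foldl (fun g p =>
      g.insert p.1 (PySem.Dict.mk [("in", 0), ("out", (p.2.length : Int)), ("total", 0)]))
      PySem.Dict.empty
  let graus := grafo.foldl (fun g u =>
      grafo.foldl (fun g v =>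
        if u.1 ∈ v.2 then
          g.modify u.1 PySem.Dict.empty (fun r => r.modify "in" 0 (· + 1))
        else g) g) graus
  let graus := grafo.foldl (fun g p =>
      g.modify p.1 PySem.Dict.empty
        (fun r => r.insert "total" (r.getD "in" 0 + r.getD "out" 0))) graus
  graus.items.map (fun p => (p.1, p.2.items))

-- ===== PORT B =====
def vertex_degrees_alt (grafo : List (String × List String)) : List (String × List (String × Int)) :=
  let indeg : PySem.Dict String Int :=
    grafo.foldl (fun d p => d.insert p.1 0) PySem.Dict.empty
  let indeg := grafo.foldl (fun d p =>
      (PySem.Set.ofList p.2).foldl (fun d v =>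
        if d.contains v then d.modify v 0 (· + 1) else d) d) indeg
  grafo.map (fun p =>
    (p.1, [("in", indeg.getD p.1 0), ("out", (p.2.length : Int)),
           ("total", indeg.getD p.1 0 + (p.2.length : Int))]))

-- ===== PRECONDITION & SPEC =====
-- Pre_ excludes association lists with duplicate keys: they do not represent any Python dict,
-- so A (whose argument is a dict) can never be called on them.
def Pre_vertex_degrees (grafo : List (String × List String)) : Prop :=
  (grafo.map Prod.fst).Nodup
instance (grafo : List (String × List String)) : Decidable (Pre_vertex_degrees grafo) := by
  unfold Pre_vertex_degrees; infer_instance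
def pvWitness_vertex_degrees : (List (String × List String)) :=
  [("a", ["b", "b", "c"]), ("b", ["a"]), ("c", [])]
def Spec_vertex_degrees (grafo : List (String × List String)) (out : List (String × List (String × Int))) : Prop := out = vertex_degrees_alt grafo
instance (grafo : List (String × List String)) (out : List (String × List (String × Int))) : Decidable (Spec_vertex_degrees grafo out) := by unfold Spec_vertex_degrees; infer_instance

-- ===== CLAIM (what is proved, stated in full; the proofs are below) =====
def Claim_equal_vertex_degrees : Prop := ∀ (grafo : List (String × List String)), Dom_vertex_degrees grafo → Pre_vertex_degrees grafo → Spec_vertex_degrees grafo (vertex_degrees grafo)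

-- ===== LEMMAS AND PROOFS =====

-- the common normal form: in-degree of u = number of entries whose adjacency list contains u
def pvIndeg (grafo : List (String × List String)) (u : String) : Int :=
  (grafo.countP (fun q => decide (u ∈ q.2)) : Int)

def pvSpecList (grafo : List (String × List String)) : List (String × List (String × Int)) :=
  grafo.map (fun p =>
    (p.1, [("in", pvIndeg grafo p.1), ("out", (p.2.length : Int)),
           ("total", pvIndeg grafo p.1 + (p.2.length : Int))]))

theorem pvContainsEq {ν : Type} (d d' : PySem.Dict String ν) (h : d'.keys = d.keys) (x : String) :
    d'.contains x = d.contains x := by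
  rw [PySem.Dict.contains_eq_decide_mem_keys, PySem.Dict.contains_eq_decide_mem_keys, h]

-- row-level facts about A's inner degree dicts (plain computation)
theorem pvRowInc (i o t : Int) :
    (PySem.Dict.mk [("in", i), ("out", o), ("total", t)]).modify "in" 0 (· + 1)
      = PySem.Dict.mk [("in", i + 1), ("out", o), ("total", t)] := rfl

theorem pvRowIter (n : Nat) (o : Int) :
    (fun r : PySem.Dict String Int => r.modify "in" 0 (· + 1))^[n]
        (PySem.Dict.mk [("in", 0), ("out", o), ("total", 0)])
      = PySem.Dict.mk [("in", (n : Int)), ("out", o), ("total", 0)] := by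
  induction n with
  | zero => rfl
  | succ n ih =>
      rw [Function.iterate_succ_apply', ih]
      have := pvRowInc (n : Int) o 0
      simp only [this]
      norm_num

-- generic fold over entries where each step touches only the key of its entry
theorem pvGenfold (f : String → PySem.Dict String Int → PySem.Dict String Int)
    (F : PySem.Dict String (PySem.Dict String Int) → (String × List String) →
         PySem.Dict String (PySem.Dict String Int)) :
    ∀ (l : List (String × List String)),
      (∀ g q, q ∈ l → g.contains q.1 = true →
        (F g q).keys = g.keys ∧
        ∀ w, (F g q).getD w PySem.Dict.empty =
          if w = q.1 then f q.1 (g.getD q.1 PySem.Dict.empty) else g.getD w PySem.Dict.empty) →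
      (l.map Prod.fst).Nodup →
      ∀ g, (∀ q ∈ l, g.contains q.1 = true) →
        (l.foldl F g).keys = g.keys ∧
        ∀ w, (l.foldl F g).getD w PySem.Dict.empty =
          if w ∈ l.map Prod.fst then f w (g.getD w PySem.Dict.empty)
          else g.getD w PySem.Dict.empty := by
  intro l
  induction l with
  | nil => intro _ _ g _; simp
  | cons q l ih =>
      intro hF hnd g hg
      have hqc : g.contains q.1 = true := hg q List.mem_cons_self
      obtain ⟨hk1, hv1⟩ := hF g q List.mem_cons_self hqc
      have hnd' : (l.map Prod.fst).Nodup := (List.nodup_cons.mp hnd).2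
      have hq_not : q.1 ∉ l.map Prod.fst := (List.nodup_cons.mp hnd).1
      have hcont1 : ∀ q' ∈ l, (F g q).contains q'.1 = true := by
        intro q' hq'
        rw [pvContainsEq g (F g q) hk1]
        exact hg q' (List.mem_cons_of_mem _ hq')
      obtain ⟨hk2, hv2⟩ := ih (fun g' q' hq' => hF g' q' (List.mem_cons_of_mem _ hq')) hnd'
        (F g q) hcont1
      constructor
      · simpa [List.foldl_cons] using hk2.trans hk1
      · intro w
        rw [List.foldl_cons, hv2 w, hv1 w]
        by_cases hw : w = q.1
        · subst hw; simp [hq_not]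
        · by_cases hm : w ∈ l.map Prod.fst <;> simp [hm, hw, List.mem_cons]

-- A's inner loop over v: all increments land on the fixed key u
theorem pvAInner (u : String) :
    ∀ (m : List (String × List String)) (g : PySem.Dict String (PySem.Dict String Int)),
      g.contains u = true →
      ((m.foldl (fun g v =>
          if u ∈ v.2 then
            g.modify u PySem.Dict.empty (fun r => r.modify "in" 0 (· + 1))
          else g) g).keys = g.keys ∧
       ∀ w, (m.foldl (fun g v =>
          if u ∈ v.2 then
            g.modify u PySem.Dict.empty (fun r => r.modify "in" 0 (· + 1))
          else g) g).getD w PySem.Dict.empty =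
          if w = u then
            (fun r : PySem.Dict String Int =>
              r.modify "in" 0 (· + 1))^[m.countP (fun v => decide (u ∈ v.2))]
              (g.getD u PySem.Dict.empty)
          else g.getD w PySem.Dict.empty) := by
  intro m
  induction m with
  | nil => intro g _; simp
  | cons v m ih =>
      intro g hc
      by_cases hv : u ∈ v.2
      · have hc1 : (g.modify u PySem.Dict.empty
            (fun r => r.modify "in" 0 (· + 1))).contains u = true := by
          simp [PySem.Dict.contains_modify]
        obtain ⟨hk, hval⟩ := ih _ hc1
        have hkeys1 : (g.modify u PySem.Dict.empty
            (fun r => r.modify "in" 0 (· + 1))).keys = g.keys := by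
          rw [PySem.Dict.keys_modify, PySem.Dict.keys_insert_of_contains _ _ hc]
        constructor
        · simp only [List.foldl_cons, if_pos hv]
          exact hk.trans hkeys1
        · intro w
          simp only [List.foldl_cons, if_pos hv]
          rw [hval w]
          by_cases hw : w = u
          · subst hw
            rw [if_pos rfl, if_pos rfl, PySem.Dict.getD_modify, if_pos rfl, List.countP_cons]
            simp only [hv, decide_true, if_pos]
            rw [Function.iterate_succ_apply]
          · rw [if_neg hw, if_neg hw, PySem.Dict.getD_modify, if_neg hw]
      · obtain ⟨hk, hval⟩ := ih g hc
        constructor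
        · simpa only [List.foldl_cons, if_neg hv] using hk
        · intro w
          simp only [List.foldl_cons, if_neg hv]
          rw [hval w, List.countP_cons]
          simp [hv]

theorem vertex_degrees_eq_spec : ∀ (grafo : List (String × List String)),
    Pre_vertex_degrees grafo → vertex_degrees grafo = pvSpecList grafo := by
  intro grafo hpre
  unfold Pre_vertex_degrees at hpre
  show List.map (fun p => (p.1, p.2.items))
      (List.foldl (fun g p => g.modify p.1 PySem.Dict.empty
          (fun r => r.insert "total" (r.getD "in" 0 + r.getD "out" 0)))
        (List.foldl (fun g u => List.foldl (fun g v =>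
            if u.1 ∈ v.2 then
              g.modify u.1 PySem.Dict.empty (fun r => r.modify "in" 0 (· + 1))
            else g) g grafo)
          (List.foldl (fun g p => g.insert p.1
              (PySem.Dict.mk [("in", 0), ("out", (p.2.length : Int)), ("total", 0)]))
            PySem.Dict.empty grafo)
          grafo)
        grafo).items = pvSpecList grafo
  -- phase 1: the initial table
  have hfresh : ∀ p ∈ grafo, (PySem.Dict.empty :
      PySem.Dict String (PySem.Dict String Int)).contains p.1 = false := by
    intro p _; exact PySem.Dict.contains_empty _
  have hitems1 := PySem.Dict.items_foldl_insert_fresh grafo Prod.fst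
      (fun p => PySem.Dict.mk [("in", 0), ("out", (p.2.length : Int)), ("total", 0)])
      PySem.Dict.empty hfresh hpre
  set d1 := grafo.foldl (fun g p =>
      g.insert p.1 (PySem.Dict.mk [("in", 0), ("out", (p.2.length : Int)), ("total", 0)]))
      PySem.Dict.empty with hd1
  have hkeys1 : d1.keys = grafo.map Prod.fst := by
    simp only [PySem.Dict.keys, hitems1, PySem.Dict.empty]
    simp
  have hnd1 : d1.keys.Nodup := by rw [hkeys1]; exact hpre
  have hcont1 : ∀ q ∈ grafo, d1.contains q.1 = true := by
    intro q hq
    rw [PySem.Dict.contains_iff_mem_keys, hkeys1]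
    exact List.mem_map_of_mem hq
  have hgetD1 : ∀ p ∈ grafo, d1.getD p.1 PySem.Dict.empty =
      PySem.Dict.mk [("in", 0), ("out", (p.2.length : Int)), ("total", 0)] := by
    intro p hp
    refine PySem.Dict.getD_of_mem_items d1 ?_ hnd1 _
    rw [hitems1]
    exact List.mem_append_right _ (List.mem_map_of_mem hp)
  -- phase 2: the nested in-degree loop
  have hGF2 := pvGenfold
      (fun w r => (fun r : PySem.Dict String Int =>
          r.modify "in" 0 (· + 1))^[grafo.countP (fun v => decide (w ∈ v.2))] r)
      (fun g u => grafo.foldl (fun g v =>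
          if u.1 ∈ v.2 then
            g.modify u.1 PySem.Dict.empty (fun r => r.modify "in" 0 (· + 1))
          else g) g)
      grafo
      (fun g q _ hc => pvAInner q.1 grafo g hc)
      hpre d1 hcont1
  obtain ⟨hk2, hv2⟩ := hGF2
  have hkeys2 : (List.foldl (fun g u => List.foldl (fun g v =>
      if u.1 ∈ v.2 then
        g.modify u.1 PySem.Dict.empty (fun r => r.modify "in" 0 (· + 1))
      else g) g grafo) d1 grafo).keys = grafo.map Prod.fst := hk2.trans hkeys1
  have hcont2 : ∀ q ∈ grafo, (List.foldl (fun g u => List.foldl (fun g v =>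
      if u.1 ∈ v.2 then
        g.modify u.1 PySem.Dict.empty (fun r => r.modify "in" 0 (· + 1))
      else g) g grafo) d1 grafo).contains q.1 = true := by
    intro q hq
    rw [PySem.Dict.contains_iff_mem_keys, hkeys2]
    exact List.mem_map_of_mem hq
  -- phase 3: totals
  have hGF3 := pvGenfold
      (fun _ r => r.insert "total" (r.getD "in" 0 + r.getD "out" 0))
      (fun g p => g.modify p.1 PySem.Dict.empty
        (fun r => r.insert "total" (r.getD "in" 0 + r.getD "out" 0)))
      grafo
      (by
        intro g q _ hc
        constructor
        · rw [PySem.Dict.keys_modify, PySem.Dict.keys_insert_of_contains _ _ hc]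
        · intro w; rw [PySem.Dict.getD_modify])
      hpre _ hcont2
  obtain ⟨hk3, hv3⟩ := hGF3
  have hkeys3 := hk3.trans hkeys2
  have hnd3 : (List.foldl (fun g p => g.modify p.1 PySem.Dict.empty
      (fun r => r.insert "total" (r.getD "in" 0 + r.getD "out" 0)))
      (List.foldl (fun g u => List.foldl (fun g v =>
        if u.1 ∈ v.2 then
          g.modify u.1 PySem.Dict.empty (fun r => r.modify "in" 0 (· + 1))
        else g) g grafo) d1 grafo) grafo).keys.Nodup := by
    rw [hkeys3]; exact hpre
  -- read the table back off
  rw [PySem.Dict.items_eq_map_keys _ hnd3 PySem.Dict.empty, hkeys3]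
  unfold pvSpecList
  rw [List.map_map, List.map_map]
  refine List.map_congr_left ?_
  intro p hp
  have hmem : p.1 ∈ grafo.map Prod.fst := List.mem_map_of_mem hp
  simp only [Function.comp]
  rw [hv3 p.1, if_pos hmem, hv2 p.1, if_pos hmem, hgetD1 p hp]
  beta_reduce
  rw [pvRowIter]
  rfl

-- B side: the degree-0 initialisation
theorem pvBInit : ∀ (l : List (String × List String)) (d : PySem.Dict String Int),
    (∀ u, d.getD u 0 = 0) →
    ∀ u, (l.foldl (fun d p => d.insert p.1 (0 : Int)) d).getD u 0 = 0 := by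
  intro l
  induction l with
  | nil => intro d h u; exact h u
  | cons p l ih =>
      intro d h u
      rw [List.foldl_cons]
      refine ih _ ?_ u
      intro w
      rw [PySem.Dict.getD_insert]
      split
      · rfl
      · exact h w

-- B side: one adjacency list, counted as a set with a containment guard
theorem pvBInner : ∀ (s : List String), s.Nodup →
    ∀ (d : PySem.Dict String Int),
      (s.foldl (fun d v => if d.contains v then d.modify v 0 (· + 1) else d) d).keys = d.keys ∧
      ∀ u, (s.foldl (fun d v => if d.contains v then d.modify v 0 (· + 1) else d) d).getD u 0 =
        d.getD u 0 + if u ∈ s ∧ d.contains u = true then 1 else 0 := by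
  intro s
  induction s with
  | nil => intro _ d; simp
  | cons v s ih =>
      intro hnd d
      have hv_not : v ∉ s := (List.nodup_cons.mp hnd).1
      have hnd' : s.Nodup := (List.nodup_cons.mp hnd).2
      by_cases hc : d.contains v = true
      · have hkeysm : (d.modify v 0 (· + 1)).keys = d.keys := by
          rw [PySem.Dict.keys_modify, PySem.Dict.keys_insert_of_contains _ _ hc]
        obtain ⟨hk, hval⟩ := ih hnd' (d.modify v 0 (· + 1))
        constructor
        · simp only [List.foldl_cons, if_pos hc]
          exact hk.trans hkeysm
        · intro u
          simp only [List.foldl_cons, if_pos hc]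
          rw [hval u, pvContainsEq d _ hkeysm u, PySem.Dict.getD_modify]
          by_cases hu : u = v
          · subst hu
            simp [hv_not, hc]
          · simp only [if_neg hu, List.mem_cons]
            by_cases hus : u ∈ s <;> simp [hus, hu]
      · obtain ⟨hk, hval⟩ := ih hnd' d
        constructor
        · simpa only [List.foldl_cons, if_neg hc] using hk
        · intro u
          simp only [List.foldl_cons, if_neg hc]
          rw [hval u]
          by_cases hu : u = v
          · subst hu; simp [hc]
          · simp [List.mem_cons, hu]

-- B side: the whole counting pass
theorem pvBOuter : ∀ (l : List (String × List String)) (d : PySem.Dict String Int),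
    (l.foldl (fun d p => (PySem.Set.ofList p.2).foldl
        (fun d v => if d.contains v then d.modify v 0 (· + 1) else d) d) d).keys = d.keys ∧
    ∀ u, d.contains u = true →
      (l.foldl (fun d p => (PySem.Set.ofList p.2).foldl
          (fun d v => if d.contains v then d.modify v 0 (· + 1) else d) d) d).getD u 0 =
        d.getD u 0 + (l.countP (fun q => decide (u ∈ q.2)) : Int) := by
  intro l
  induction l with
  | nil => intro d; simp
  | cons p l ih =>
      intro d
      obtain ⟨hki, hvi⟩ := pvBInner (PySem.Set.ofList p.2) (PySem.Set.nodup_ofList p.2) d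
      obtain ⟨hk, hval⟩ := ih ((PySem.Set.ofList p.2).foldl
          (fun d v => if d.contains v then d.modify v 0 (· + 1) else d) d)
      constructor
      · simp only [List.foldl_cons]
        exact hk.trans hki
      · intro u hu
        simp only [List.foldl_cons]
        rw [hval u (by rw [pvContainsEq d _ hki u]; exact hu), hvi u, List.countP_cons]
        by_cases hmem : u ∈ p.2
        · rw [if_pos ⟨(PySem.Set.mem_ofList _ _).mpr hmem, hu⟩]
          simp only [hmem, decide_true, if_pos]
          push_cast
          ring
        · rw [if_neg (fun h => hmem ((PySem.Set.mem_ofList _ _).mp h.1))]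
          simp only [hmem, decide_false]
          push_cast
          ring

theorem vertex_degrees_alt_eq_spec : ∀ (grafo : List (String × List String)),
    Pre_vertex_degrees grafo → vertex_degrees_alt grafo = pvSpecList grafo := by
  intro grafo _
  show (grafo.map (fun p =>
      (p.1, [("in", (grafo.foldl (fun d p => (PySem.Set.ofList p.2).foldl
                (fun d v => if d.contains v then d.modify v 0 (· + 1) else d) d)
              (grafo.foldl (fun d p => d.insert p.1 (0 : Int)) PySem.Dict.empty)).getD p.1 0),
            ("out", (p.2.length : Int)),
            ("total", (grafo.foldl (fun d p => (PySem.Set.ofList p.2).foldl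
                (fun d v => if d.contains v then d.modify v 0 (· + 1) else d) d)
              (grafo.foldl (fun d p => d.insert p.1 (0 : Int)) PySem.Dict.empty)).getD p.1 0
              + (p.2.length : Int))]))) = pvSpecList grafo
  set d0 := grafo.foldl (fun d p => d.insert p.1 (0 : Int)) PySem.Dict.empty with hd0
  have hgetD0 : ∀ u, d0.getD u 0 = 0 :=
    pvBInit grafo PySem.Dict.empty (fun u => PySem.Dict.getD_empty u 0)
  have hkeys0 : d0.keys = PySem.Set.ofList (grafo.map Prod.fst) := by
    rw [hd0, PySem.Dict.keys_foldl_insert_key grafo Prod.fst (fun _ _ => (0 : Int)) PySem.Dict.empty]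
    rw [show (PySem.Dict.empty : PySem.Dict String Int).keys = [] from rfl]
    exact PySem.Set.update_nil_left _
  have hcont0 : ∀ q ∈ grafo, d0.contains q.1 = true := by
    intro q hq
    rw [PySem.Dict.contains_iff_mem_keys, hkeys0, PySem.Set.mem_ofList]
    exact List.mem_map_of_mem hq
  obtain ⟨_, hval⟩ := pvBOuter grafo d0
  unfold pvSpecList
  refine List.map_congr_left ?_
  intro p hp
  rw [hval p.1 (hcont0 p hp), hgetD0 p.1, zero_add]
  rfl

-- ===== VERDICT (by name: the statement is the Claim_ definition above) =====
theorem vertex_degrees_spec : Claim_equal_vertex_degrees := by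
  intro grafo _ hpre
  unfold Spec_vertex_degrees
  rw [vertex_degrees_eq_spec grafo hpre, vertex_degrees_alt_eq_spec grafo hpre]
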